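-- pv_equiv track=rewrite | github.com/anshulk-cmu/Arithmetic-Geometry | phase_b_deconfounding.py | _get_input_digit_place
-- ===== SOURCE A (Python) =====
-- def _get_input_digit_place(name):
--     """Return (operand, place_index) for input digits.
--
--     a_units -> ('a', 0), a_tens -> ('a', 1), a_hundreds -> ('a', 2)
--     b_units -> ('b', 0), b_tens -> ('b', 1), b_hundreds -> ('b', 2)
--     """
--     place_map = {"units": 0, "tens": 1, "hundreds": 2}
--     for prefix in ("a_", "b_"):
--         if name.startswith(prefix):
--             place = name[len(prefix):]
--             if place in place_map:
--                 return (prefix[0], place_map[place])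
--     return None
-- ===== SOURCE B (Python) =====
-- def _get_input_digit_place(name):
--     """Split-once reimplementation: one parse pass instead of prefix iteration."""
--     parts = name.split("_", 1)
--     if len(parts) != 2:
--         return None
--     operand, place = parts
--     place_map = {"units": 0, "tens": 1, "hundreds": 2}
--     if operand in ("a", "b") and place in place_map:
--         return (operand, place_map[place])
--     return None
-- ===== Notes on version B (the rewrite author's own statement) =====
-- stated objective: idiomatic
-- what changed: B splits the name once at the first underscore and validates the two parts against the operand set and place map, instead of A's loop over candidate prefixes with startswith and slicing.
import Mathlib
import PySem

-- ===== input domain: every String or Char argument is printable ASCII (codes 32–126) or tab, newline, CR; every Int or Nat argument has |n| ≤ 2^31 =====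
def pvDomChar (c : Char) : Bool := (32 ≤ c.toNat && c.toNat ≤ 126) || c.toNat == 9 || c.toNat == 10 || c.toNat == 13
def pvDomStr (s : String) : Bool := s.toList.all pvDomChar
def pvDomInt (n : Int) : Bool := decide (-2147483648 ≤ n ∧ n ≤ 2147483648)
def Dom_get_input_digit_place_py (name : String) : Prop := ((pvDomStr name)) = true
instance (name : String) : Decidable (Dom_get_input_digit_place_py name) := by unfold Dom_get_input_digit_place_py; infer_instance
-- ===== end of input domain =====

-- B replaces A's prefix-iteration parse by a single split-at-first-underscore and validation; same result, more idiomatic.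

-- ===== PORT A =====
-- the 'for prefix in ("a_", "b_")' loop with early return, as structural recursion over the tuple's elements
def pyA_go (name : String) (pm : PySem.Dict String Int) : List String → Option (String × Int)
  | [] => none
  | pfx :: rest =>
    if PySem.Str.startswith name pfx then
      let place := PySem.Str.slice name (some (PySem.Str.len pfx)) none   -- name[len(prefix):]
      match PySem.Dict.get? pm place with
      | some v =>
        -- prefix[0]: both literals are nonempty, so pyGet? is always some here
        match PySem.Str.pyGet? pfx 0 with
        | some c => some (String.ofList [c], v)
        | none => none
      | none => pyA_go name pm rest
    else pyA_go name pm rest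

def get_input_digit_place_py (name : String) : Option (String × Int) :=
  let place_map : PySem.Dict String Int := ⟨[("units", 0), ("tens", 1), ("hundreds", 2)]⟩
  pyA_go name place_map ["a_", "b_"]

-- ===== PORT B =====
def get_input_digit_place_py_alt (name : String) : Option (String × Int) :=
  match PySem.Str.splitMax? name "_" 1 with
  | none => none   -- unreachable: separator "_" is nonempty
  | some parts =>
    match parts with
    | [operand, place] =>   -- len(parts) == 2: unpack; any other length returns None
      let place_map : PySem.Dict String Int := ⟨[("units", 0), ("tens", 1), ("hundreds", 2)]⟩
      if operand == "a" || operand == "b" then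
        match PySem.Dict.get? place_map place with
        | some v => some (operand, v)
        | none => none
      else none
    | _ => none

-- ===== PRECONDITION & SPEC =====
def Spec_get_input_digit_place_py (name : String) (out : Option (String × Int)) : Prop := out = get_input_digit_place_py_alt name
instance (name : String) (out : Option (String × Int)) : Decidable (Spec_get_input_digit_place_py name out) := by unfold Spec_get_input_digit_place_py; infer_instance

-- ===== CLAIM (what is proved, stated in full; the proofs are below) =====
def Claim_equal_get_input_digit_place_py : Prop := ∀ (name : String), Dom_get_input_digit_place_py name → Spec_get_input_digit_place_py name (get_input_digit_place_py name)

-- ===== LEMMAS AND PROOFS =====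

-- After the single split happens, maxsplit is exhausted: the rest is one piece.
theorem go_zero (fuel : Nat) (q : List Char) (acc : List (List Char)) :
    PySem.Chars.splitOnMax.go ['_'] fuel 0 q [] acc = (q :: acc).reverse := by
  cases fuel <;> cases q <;> simp [PySem.Chars.splitOnMax.go]

theorem go_step (f : Nat) (c : Char) (hc : c ≠ '_') (p' cur : List Char) (acc : List (List Char)) :
    PySem.Chars.splitOnMax.go ['_'] (f+1) 1 (c :: p') cur acc
      = PySem.Chars.splitOnMax.go ['_'] f 1 p' (c :: cur) acc := by
  have hpre : (['_'].isPrefixOf (c :: p')) = false := by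
    simp [List.isPrefixOf]; exact fun h => (hc h.symm).elim
  simp [PySem.Chars.splitOnMax.go, hpre]

theorem go_hit (f : Nat) (q cur : List Char) (acc : List (List Char)) :
    PySem.Chars.splitOnMax.go ['_'] (f+1) 1 ('_' :: q) cur acc
      = PySem.Chars.splitOnMax.go ['_'] f 0 q [] (cur.reverse :: acc) := by
  simp [PySem.Chars.splitOnMax.go, List.isPrefixOf]

theorem go_no_sep (p : List Char) (hp : '_' ∉ p) :
    ∀ (fuel : Nat) (cur : List Char) (acc : List (List Char)), p.length < fuel →
    PySem.Chars.splitOnMax.go ['_'] fuel 1 p cur acc = ((cur.reverse ++ p) :: acc).reverse := by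
  induction p with
  | nil =>
    intro fuel cur acc hf
    cases fuel with
    | zero => omega
    | succ f => simp [PySem.Chars.splitOnMax.go]
  | cons c p' ih =>
    intro fuel cur acc hf
    cases fuel with
    | zero => omega
    | succ f =>
      have hc : c ≠ '_' := fun h => hp (h ▸ List.mem_cons_self ..)
      rw [go_step f c hc, ih (fun h => hp (List.mem_cons_of_mem _ h)) f (c :: cur) acc (by simpa using Nat.lt_of_succ_lt_succ hf)]
      simp

theorem go_sep (p : List Char) (hp : '_' ∉ p) :
    ∀ (q : List Char) (fuel : Nat) (cur : List Char) (acc : List (List Char)), p.length < fuel →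
    PySem.Chars.splitOnMax.go ['_'] fuel 1 (p ++ '_' :: q) cur acc = (q :: (cur.reverse ++ p) :: acc).reverse := by
  induction p with
  | nil =>
    intro q fuel cur acc hf
    cases fuel with
    | zero => omega
    | succ f => rw [List.nil_append, go_hit, go_zero]; simp
  | cons c p' ih =>
    intro q fuel cur acc hf
    cases fuel with
    | zero => omega
    | succ f =>
      have hc : c ≠ '_' := fun h => hp (h ▸ List.mem_cons_self ..)
      rw [List.cons_append, go_step f c hc,
        ih (fun h => hp (List.mem_cons_of_mem _ h)) q f (c :: cur) acc (by simpa using Nat.lt_of_succ_lt_succ hf)]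
      simp

-- characterization of s.split('_', 1) at the char level
theorem splitOnMax_no_sep (s : List Char) (h : '_' ∉ s) :
    PySem.Chars.splitOnMax s ['_'] 1 = [s] := by
  rw [PySem.Chars.splitOnMax, if_neg (by norm_num)]
  rw [show (Int.toNat 1) = 1 from rfl]
  rw [go_no_sep s h (s.length + 1) [] [] (by omega)]
  simp

theorem splitOnMax_sep (p q : List Char) (hp : '_' ∉ p) :
    PySem.Chars.splitOnMax (p ++ '_' :: q) ['_'] 1 = [p, q] := by
  rw [PySem.Chars.splitOnMax, if_neg (by norm_num)]
  rw [show (Int.toNat 1) = 1 from rfl]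
  rw [go_sep p hp q _ [] [] (by simp)]
  simp

theorem str_ofList_eq_iff (l : List Char) (t : String) : (String.ofList l = t) ↔ l = t.toList := by
  constructor
  · intro h; rw [← h, String.toList_ofList]
  · intro h; rw [h]; exact String.toList_inj.mp (by simp)

theorem first_underscore (s : List Char) (h : '_' ∈ s) :
    ∃ p q, s = p ++ '_' :: q ∧ '_' ∉ p := by
  induction s with
  | nil => cases h
  | cons c t ih =>
    by_cases hc : c = '_'
    · exact ⟨[], t, by simp [hc], by simp⟩
    · obtain ⟨p, q, h1, h2⟩ := ih (by
        rcases List.mem_cons.mp h with h' | h'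
        · exact absurd h'.symm hc
        · exact h')
      exact ⟨c :: p, q, by simp [h1], by
        intro hm
        rcases List.mem_cons.mp hm with h' | h'
        · exact hc h'.symm
        · exact h2 h'⟩

-- ===== VERDICT (by name: the statement is the Claim_ definition above) =====
theorem get_input_digit_place_py_spec : Claim_equal_get_input_digit_place_py := by
  intro name _dom
  unfold Spec_get_input_digit_place_py get_input_digit_place_py get_input_digit_place_py_alt
  have hsp : PySem.Str.splitMax? name "_" 1
      = some ((PySem.Chars.splitOnMax name.toList ['_'] 1).map String.ofList) := by
    simp [PySem.Str.splitMax?, PySem.Chars.splitMax?]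
  by_cases h : '_' ∈ name.toList
  · obtain ⟨p, q, hpq, hp⟩ := first_underscore name.toList h
    rw [hpq] at hsp
    rw [splitOnMax_sep p q hp] at hsp
    rw [hsp]
    rcases p with _ | ⟨c, _ | ⟨d, rest⟩⟩
    · -- first part empty: name starts with '_'
      have ha : PySem.Chars.startswith name.toList ['a', '_'] = false := by
        rw [hpq]; simp [PySem.Chars.startswith, List.isPrefixOf]
      have hb : PySem.Chars.startswith name.toList ['b', '_'] = false := by
        rw [hpq]; simp [PySem.Chars.startswith, List.isPrefixOf]
      simp [pyA_go, ha, hb]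
    · -- first part a single character c
      have hslice : PySem.Str.slice name (some 2) = String.ofList q := by
        simp [PySem.Str.slice, PySem.Chars.slice, hpq, PySem.List.slice_some_none, PySem.List.clampIdx]
      by_cases hca : c = 'a'
      · subst hca
        have ha : PySem.Chars.startswith name.toList ['a', '_'] = true := by
          rw [hpq]; simp [PySem.Chars.startswith, List.isPrefixOf]
        have hb : PySem.Chars.startswith name.toList ['b', '_'] = false := by
          rw [hpq]; simp [PySem.Chars.startswith, List.isPrefixOf]
        simp [pyA_go, ha, hb, hslice]
      · by_cases hcb : c = 'b'
        · subst hcb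
          have ha : PySem.Chars.startswith name.toList ['a', '_'] = false := by
            rw [hpq]; simp [PySem.Chars.startswith, List.isPrefixOf]
          have hb : PySem.Chars.startswith name.toList ['b', '_'] = true := by
            rw [hpq]; simp [PySem.Chars.startswith, List.isPrefixOf]
          simp [pyA_go, ha, hb, hslice]
        · have ha : PySem.Chars.startswith name.toList ['a', '_'] = false := by
            rw [hpq]; simp [PySem.Chars.startswith, List.isPrefixOf]
            exact fun hh => hca hh.symm
          have hb : PySem.Chars.startswith name.toList ['b', '_'] = false := by
            rw [hpq]; simp [PySem.Chars.startswith, List.isPrefixOf]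
            exact fun hh => hcb hh.symm
          have hna : (String.ofList [c] == "a") = false := by
            simp [str_ofList_eq_iff]; intro hcontra; exact absurd (by simpa using hcontra) hca
          have hnb : (String.ofList [c] == "b") = false := by
            simp [str_ofList_eq_iff]; intro hcontra; exact absurd (by simpa using hcontra) hcb
          simp [pyA_go, ha, hb, hna, hnb]
    · -- first part has at least two characters
      have hd : d ≠ '_' := fun hh => hp (by simp [hh])
      have ha : PySem.Chars.startswith name.toList ['a', '_'] = false := by
        rw [hpq]; simp [PySem.Chars.startswith, List.isPrefixOf]
        exact fun _ hh => hd hh.symm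
      have hb : PySem.Chars.startswith name.toList ['b', '_'] = false := by
        rw [hpq]; simp [PySem.Chars.startswith, List.isPrefixOf]
        exact fun _ hh => hd hh.symm
      have hna : (String.ofList (c :: d :: rest) == "a") = false := by
        simp [str_ofList_eq_iff]
      have hnb : (String.ofList (c :: d :: rest) == "b") = false := by
        simp [str_ofList_eq_iff]
      simp [pyA_go, ha, hb, hna, hnb]
  · rw [splitOnMax_no_sep _ h] at hsp
    rw [hsp]
    have ha : PySem.Chars.startswith name.toList ['a', '_'] = false :=
      Bool.eq_false_iff.mpr fun t => h (((PySem.Chars.startswith_iff _ _).mp t).subset (by decide))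
    have hb : PySem.Chars.startswith name.toList ['b', '_'] = false :=
      Bool.eq_false_iff.mpr fun t => h (((PySem.Chars.startswith_iff _ _).mp t).subset (by decide))
    simp [pyA_go, ha, hb]
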